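-- pv_equiv track=rewrite | github.com/Per48edjes/MIT-6006 | PSET 2/satisfying_booking.py | merge_adjacent_bookings
-- ===== SOURCE A (Python) =====
-- def merge_adjacent_bookings(
--     B: tuple[tuple[int, int, int]]
-- ) -> tuple[tuple[int, int, int]]:
--     """
--     Returns booking schedule with adjacent bookings having same number of rooms merged
--
--     >>> B = ((2, 0, 2), (2, 2, 4), (2, 4, 10))
--     >>> merge_adjacent_bookings(B)
--     ((2, 0, 10),)
--     """
--     j, new_B = 1, [B[0]]
--     while j < len(B):
--         left_k, left_start, left_end = new_B[-1]
--         right_k, right_start, right_end = (new_b := B[j])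
--         if j < len(B) and left_k == right_k and left_end == right_start:
--             new_B.pop()
--             new_b = (left_k, left_start, right_end)
--         new_B.append(new_b)
--         j += 1
--     return tuple(new_B)
-- ===== SOURCE B (Python) =====
-- def merge_adjacent_bookings(
--     B: tuple[tuple[int, int, int]]
-- ) -> tuple[tuple[int, int, int]]:
--     # One pass keeping only the current run's (k, start, end) instead of
--     # popping/re-appending on a growing list.
--     k, s, e = B[0]
--     out = []
--     for bk, bs, be in B[1:]:
--         if bk == k and bs == e:
--             e = be
--         else:
--             out.append((k, s, e))
--             k, s, e = bk, bs, be
--     out.append((k, s, e))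
--     return tuple(out)
-- ===== Notes on version B (the rewrite author's own statement) =====
-- stated objective: simpler
-- what changed: B replaces A's pop-and-reappend manipulation of the growing result list with a single pass that keeps only the current run's (k, start, end) triple and emits it when the run breaks.
import Mathlib
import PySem

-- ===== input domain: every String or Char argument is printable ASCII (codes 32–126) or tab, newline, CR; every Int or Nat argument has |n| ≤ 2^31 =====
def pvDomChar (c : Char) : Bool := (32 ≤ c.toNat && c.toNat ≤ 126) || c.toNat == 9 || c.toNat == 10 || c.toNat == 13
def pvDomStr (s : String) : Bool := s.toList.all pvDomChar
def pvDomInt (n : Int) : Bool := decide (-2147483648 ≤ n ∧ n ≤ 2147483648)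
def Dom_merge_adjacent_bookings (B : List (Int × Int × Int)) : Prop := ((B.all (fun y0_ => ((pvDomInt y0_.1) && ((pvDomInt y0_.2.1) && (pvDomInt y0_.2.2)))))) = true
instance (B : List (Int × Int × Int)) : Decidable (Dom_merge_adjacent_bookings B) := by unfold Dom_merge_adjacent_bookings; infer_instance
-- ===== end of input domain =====

-- B keeps only the current run's triple in a single pass instead of A's pop/re-append on the result list (objective: simpler).

-- ===== PORT A =====
-- A's while loop over j with list new_B: new_B[-1] inspected, pop + append at the end.
-- list tail operations are ported on a reversed accumulator (head = Python new_B[-1]); the final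
-- `tuple(new_B)` is the reverse.
def mergeA_go (acc : List (Int × Int × Int)) (rest : List (Int × Int × Int)) : List (Int × Int × Int) :=
  match rest with
  | [] => acc.reverse
  | b :: rest' =>
    match acc with
    | [] => mergeA_go [b] rest'   -- unreachable: new_B starts as [B[0]] and never empties
    | last :: accT =>
      if last.1 == b.1 && last.2.2 == b.2.1 then
        mergeA_go ((last.1, last.2.1, b.2.2) :: accT) rest'
      else
        mergeA_go (b :: last :: accT) rest'

def merge_adjacent_bookings (B : List (Int × Int × Int)) : List (Int × Int × Int) :=
  match B with
  | [] => []   -- Python: B[0] raises IndexError; excluded by Pre_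
  | b0 :: rest => mergeA_go [b0] rest

-- ===== PORT B =====
def mergeB_go (k s e : Int) (out : List (Int × Int × Int)) (rest : List (Int × Int × Int)) :
    List (Int × Int × Int) :=
  match rest with
  | [] => out ++ [(k, s, e)]
  | (bk, bs, be) :: rest' =>
    if bk == k && bs == e then mergeB_go k s be out rest'
    else mergeB_go bk bs be (out ++ [(k, s, e)]) rest'

def merge_adjacent_bookings_alt (B : List (Int × Int × Int)) : List (Int × Int × Int) :=
  match B with
  | [] => []   -- Python: B[0] raises IndexError; excluded by Pre_
  | (k, s, e) :: rest => mergeB_go k s e [] rest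

-- ===== PRECONDITION & SPEC =====
-- Pre_ excludes only the empty tuple, on which A raises IndexError at B[0].
def Pre_merge_adjacent_bookings (B : List (Int × Int × Int)) : Prop := B ≠ []
instance (B : List (Int × Int × Int)) : Decidable (Pre_merge_adjacent_bookings B) := by
  unfold Pre_merge_adjacent_bookings; infer_instance

def pvWitness_merge_adjacent_bookings : (List (Int × Int × Int)) := [(2, 0, 2), (2, 2, 4), (2, 4, 10)]

def Spec_merge_adjacent_bookings (B : List (Int × Int × Int)) (out : List (Int × Int × Int)) : Prop := out = merge_adjacent_bookings_alt B
instance (B : List (Int × Int × Int)) (out : List (Int × Int × Int)) : Decidable (Spec_merge_adjacent_bookings B out) := by unfold Spec_merge_adjacent_bookings; infer_instance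

-- ===== CLAIM (what is proved, stated in full; the proofs are below) =====
def Claim_equal_merge_adjacent_bookings : Prop := ∀ (B : List (Int × Int × Int)), Dom_merge_adjacent_bookings B → Pre_merge_adjacent_bookings B → Spec_merge_adjacent_bookings B (merge_adjacent_bookings B)

-- ===== LEMMAS AND PROOFS =====

lemma mergeA_go_eq_mergeB_go (rest : List (Int × Int × Int)) :
    ∀ (k s e : Int) (accT : List (Int × Int × Int)),
      mergeA_go ((k, s, e) :: accT) rest = mergeB_go k s e accT.reverse rest := by
  induction rest with
  | nil => intro k s e accT; simp [mergeA_go, mergeB_go]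
  | cons b rest' ih =>
    intro k s e accT
    obtain ⟨bk, bs, be⟩ := b
    by_cases h : bk = k ∧ bs = e
    · obtain ⟨h1, h2⟩ := h
      simp [mergeA_go, mergeB_go, h1, h2, ih]
    · simp only [mergeA_go, mergeB_go]
      rw [if_neg, if_neg, ih bk bs be ((k, s, e) :: accT)]
      · simp
      · simp only [Bool.and_eq_true, beq_iff_eq]; rintro ⟨h1, h2⟩; exact h ⟨h1, h2⟩
      · simp only [Bool.and_eq_true, beq_iff_eq]; rintro ⟨h1, h2⟩; exact h ⟨h1.symm, h2.symm⟩

-- ===== VERDICT (by name: the statement is the Claim_ definition above) =====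
theorem merge_adjacent_bookings_spec : Claim_equal_merge_adjacent_bookings := by
  intro B _ hpre
  unfold Spec_merge_adjacent_bookings
  match B with
  | [] => exact absurd rfl hpre
  | (k, s, e) :: rest =>
    show mergeA_go [(k, s, e)] rest = mergeB_go k s e [] rest
    simpa using mergeA_go_eq_mergeB_go rest k s e []
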